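-- pv_equiv track=rewrite | github.com/purkek1337/sum_negative_between_min_max | main.py | sum_negative_between_min_max
-- ===== SOURCE A (Python) =====
-- def sum_negative_between_min_max(array):
--     min_index = array.index(min(array)) # Индекс минимального элемента
--     max_index = array.index(max(array)) # Индекс максимального элемента
--     start, end = sorted([min_index, max_index]) # Определение начала и конца диапазона
--     negative_sum = 0 # Инициализация переменной для суммы отрицательных элементов
--     for i in array[start + 1:end]: # Перебор каждого элемента
--         if i < 0: # Если элемент отрицательный, добавляем к сумме
--             negative_sum += i
--     return negative_sum # Возвращаем итоговую сумму
-- ===== SOURCE B (Python) =====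
-- def sum_negative_between_min_max(array):
--     mn = mx = array[0]  # empty array raises here (IndexError); A raises ValueError
--     mn_i = mx_i = 0
--     prefix = [0]  # prefix[k] = sum of negatives among array[:k]
--     k = 0
--     for v in array:
--         prefix.append(prefix[-1] + (v if v < 0 else 0))
--         if v < mn:
--             mn, mn_i = v, k
--         elif v > mx:
--             mx, mx_i = v, k
--         k += 1
--     lo, hi = (mn_i, mx_i) if mn_i <= mx_i else (mx_i, mn_i)
--     return prefix[hi] - prefix[lo + 1] if hi > lo else 0
-- ===== Notes on version B (the rewrite author's own statement) =====
-- stated objective: alternative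
-- what changed: B builds a prefix-sum array of negatives in one combined pass (while tracking first-occurrence min/max indices with an explicit counter) and returns the answer as a difference of two prefix sums, instead of A's min()/max(), two list.index scans, a slice copy and a summing loop.
-- outside the precondition, e.g. on sum_negative_between_min_max([]): A raises ValueError, B raises IndexError
import Mathlib
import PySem

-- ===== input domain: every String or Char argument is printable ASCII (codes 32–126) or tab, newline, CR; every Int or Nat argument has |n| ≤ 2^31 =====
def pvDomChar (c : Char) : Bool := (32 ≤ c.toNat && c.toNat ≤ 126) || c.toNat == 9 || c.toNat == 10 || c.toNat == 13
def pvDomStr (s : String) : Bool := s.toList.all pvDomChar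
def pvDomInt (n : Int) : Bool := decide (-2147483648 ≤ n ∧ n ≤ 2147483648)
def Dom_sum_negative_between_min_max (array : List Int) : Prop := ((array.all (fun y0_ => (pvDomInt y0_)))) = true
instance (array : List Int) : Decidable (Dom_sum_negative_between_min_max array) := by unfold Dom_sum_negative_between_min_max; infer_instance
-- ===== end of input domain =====

-- B replaces A's min()/max() + two index() scans + slice + summing loop by ONE pass that builds a
-- prefix-sum array of negatives while tracking first-occurrence min/max indices, then returns a
-- difference of two prefix sums (objective: alternative).

-- ===== PORT A =====
def sum_negative_between_min_max (array : List Int) : Int :=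
  match PySem.List.min? array (fun x => x), PySem.List.max? array (fun x => x) with
  | some mn, some mx =>
    match PySem.List.index? array mn, PySem.List.index? array mx with
    | some min_index, some max_index =>
      match PySem.List.sorted [min_index, max_index] (fun x => x) false with
      | [start, «end»] =>
        (PySem.List.slice array (some ((start : Int) + 1)) (some («end» : Int))).foldl
          (fun negative_sum i => if i < 0 then negative_sum + i else negative_sum) 0
      | _ => 0  -- unreachable: sorted of a 2-list has 2 elements
    | _, _ => 0  -- unreachable: min/max are members
  | _, _ => 0  -- Python: min([]) raises ValueError (outside Pre_)

-- ===== PORT B =====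
-- the if/elif min-max update of Source B's loop body (p = (index, value))
def pvAltStep (st : (Int × Int) × (Int × Int)) (p : Int × Int) : (Int × Int) × (Int × Int) :=
  if p.2 < st.1.1 then ((p.2, p.1), st.2)
  else if p.2 > st.2.1 then (st.1, (p.2, p.1))
  else st

-- Source B's loop body: state = (prefix list, ((mn, mn_i), (mx, mx_i)), k)
-- 'prefix[-1]' ported as pyGet? … (-1) (prefix starts as [0] and only grows, so never none)
def pvBStep (st : List Int × ((Int × Int) × (Int × Int)) × Int) (v : Int) :
    List Int × ((Int × Int) × (Int × Int)) × Int :=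
  (st.1 ++ [(PySem.List.pyGet? st.1 (-1)).getD 0 + (if v < 0 then v else 0)],
   pvAltStep st.2.1 (st.2.2, v), st.2.2 + 1)

def sum_negative_between_min_max_alt (array : List Int) : Int :=
  match array with
  | [] => 0  -- Python: array[0] raises IndexError (outside Pre_)
  | a0 :: _ =>
    let st := array.foldl pvBStep ([0], ((a0, 0), (a0, 0)), 0)
    let pfx := st.1
    let mni := st.2.1.1.2
    let mxi := st.2.1.2.2
    let lo := if mni ≤ mxi then mni else mxi
    let hi := if mni ≤ mxi then mxi else mni
    -- prefix[hi], prefix[lo+1]: indices are in range (prefix has length n+1), so getD never fires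
    if lo < hi then
      (PySem.List.pyGet? pfx hi).getD 0 - (PySem.List.pyGet? pfx (lo + 1)).getD 0
    else 0

-- ===== PRECONDITION & SPEC =====
-- Pre_: Python A raises ValueError (min of empty sequence) on []; excluded.
def Pre_sum_negative_between_min_max (array : List Int) : Prop := array ≠ []
instance (array : List Int) : Decidable (Pre_sum_negative_between_min_max array) := by
  unfold Pre_sum_negative_between_min_max; infer_instance
def pvWitness_sum_negative_between_min_max : List Int := [1, -2, 3]

def Spec_sum_negative_between_min_max (array : List Int) (out : Int) : Prop := out = sum_negative_between_min_max_alt array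
instance (array : List Int) (out : Int) : Decidable (Spec_sum_negative_between_min_max array out) := by unfold Spec_sum_negative_between_min_max; infer_instance

-- ===== CLAIM (what is proved, stated in full; the proofs are below) =====
def Claim_equal_sum_negative_between_min_max : Prop := ∀ (array : List Int), Dom_sum_negative_between_min_max array → Pre_sum_negative_between_min_max array → Spec_sum_negative_between_min_max array (sum_negative_between_min_max array)

-- ===== LEMMAS AND PROOFS =====

def pvNeg (v : Int) : Int := if v < 0 then v else 0

def pvNegsum (l : List Int) : Int := (l.filter (fun i => decide (i < 0))).sum

-- the reference prefix list (tail): running sums of negatives starting from c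
def pvPrefixes : Int → List Int → List Int
  | _, [] => []
  | c, v :: t => (c + pvNeg v) :: pvPrefixes (c + pvNeg v) t

-- reference scans for the min/max half of B's pass
def pvScanMin : List Int → Int → (Int × Int) → (Int × Int)
  | [], _, s => s
  | v :: t, k, s => pvScanMin t (k + 1) (if v < s.1 then (v, k) else s)

def pvScanMax : List Int → Int → (Int × Int) → (Int × Int)
  | [], _, s => s
  | v :: t, k, s => pvScanMax t (k + 1) (if v > s.1 then (v, k) else s)

theorem pvBfold (t : List Int) (p0 : List Int) (x : Int)
    (mm : (Int × Int) × (Int × Int)) (k : Int) (hmm : mm.1.1 ≤ mm.2.1) :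
    t.foldl pvBStep (p0 ++ [x], mm, k)
      = ((p0 ++ [x]) ++ pvPrefixes x t, (pvScanMin t k mm.1, pvScanMax t k mm.2), k + t.length) := by
  induction t generalizing p0 x mm k with
  | nil => simp [pvPrefixes, pvScanMin, pvScanMax]
  | cons v t ih =>
    simp only [List.foldl_cons, pvBStep, PySem.List.pyGet?_neg_one_append_singleton,
      Option.getD_some, pvScanMin, pvScanMax]
    by_cases h1 : v < mm.1.1
    · have h2 : ¬ v > mm.2.1 := by omega
      rw [show (p0 ++ [x]) ++ [x + if v < 0 then v else 0] = (p0 ++ [x]) ++ [x + pvNeg v] by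
            simp [pvNeg],
          ih (p0 ++ [x]) (x + pvNeg v) _ (k + 1) (by simp [pvAltStep, h1]; omega)]
      simp [pvAltStep, h1, h2, pvPrefixes]
      omega
    · by_cases h2 : v > mm.2.1
      · rw [show (p0 ++ [x]) ++ [x + if v < 0 then v else 0] = (p0 ++ [x]) ++ [x + pvNeg v] by
              simp [pvNeg],
            ih (p0 ++ [x]) (x + pvNeg v) _ (k + 1) (by simp [pvAltStep, h1, h2]; omega)]
        simp [pvAltStep, h1, h2, pvPrefixes]
        omega
      · rw [show (p0 ++ [x]) ++ [x + if v < 0 then v else 0] = (p0 ++ [x]) ++ [x + pvNeg v] by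
              simp [pvNeg],
            ih (p0 ++ [x]) (x + pvNeg v) _ (k + 1) (by simp [pvAltStep, h1, h2]; omega)]
        simp [pvAltStep, h1, h2, pvPrefixes]
        omega

theorem pvNegsum_cons (v : Int) (l : List Int) :
    pvNegsum (v :: l) = pvNeg v + pvNegsum l := by
  by_cases h : v < 0 <;> simp [pvNegsum, pvNeg, h]

theorem pvPget (l : List Int) (c : Int) (m : Nat) (hm : m ≤ l.length) :
    (c :: pvPrefixes c l)[m]? = some (c + pvNegsum (l.take m)) := by
  induction l generalizing c m with
  | nil =>
    obtain rfl : m = 0 := Nat.le_zero.mp (by simpa using hm)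
    simp [pvNegsum, pvPrefixes]
  | cons v t ih =>
    cases m with
    | zero => simp [pvNegsum]
    | succ m' =>
      simp only [pvPrefixes, List.getElem?_cons_succ]
      rw [ih (c + pvNeg v) m' (by simpa using hm)]
      rw [List.take_succ_cons, pvNegsum_cons]
      ring_nf

theorem pvNegsum_split (l : List Int) (a b : Nat) (h : a ≤ b) :
    pvNegsum (l.take b) = pvNegsum (l.take a) + pvNegsum ((l.drop a).take (b - a)) := by
  conv_lhs => rw [show b = a + (b - a) by omega, List.take_add]
  simp [pvNegsum, List.filter_append]

theorem pvIndexLt (l : List Int) (v : Int) (j : Nat)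
    (h : PySem.List.index? l v = some j) : j < l.length := by
  induction l generalizing j with
  | nil => simp [PySem.List.index?_eq_idxOf?] at h
  | cons x t ih =>
    by_cases hx : x = v
    · subst hx
      rw [PySem.List.index?_cons_self] at h
      simp_all; omega
    · rw [PySem.List.index?_cons_of_ne t hx] at h
      obtain ⟨j', hj', rfl⟩ := Option.map_eq_some_iff.1 h
      have := ih j' hj'
      simp; omega

theorem pvScanMinSpec (t : List Int) (k mn mi : Int) :
    pvScanMin t k (mn, mi) =
      (t.foldl min mn,
       if t.foldl min mn < mn then k + ((PySem.List.index? t (t.foldl min mn)).getD 0 : Int) else mi) := by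
  induction t generalizing k mn mi with
  | nil => simp [pvScanMin]
  | cons v t ih =>
    simp only [pvScanMin, List.foldl_cons]
    by_cases hv : v < mn
    · have hminv : min mn v = v := by omega
      rw [if_pos hv, ih, hminv]
      have hle : t.foldl min v ≤ v := (PySem.List.foldl_min_le t v).1
      have hcond : t.foldl min v < mn := by omega
      rw [if_pos hcond]
      by_cases he : v = t.foldl min v
      · rw [← he, PySem.List.index?_cons_self]
        simp
      · have hmem : t.foldl min v ∈ t := by
          rcases PySem.List.foldl_min_mem t v with h | h
          · exact absurd h.symm he
          · exact h
        obtain ⟨j, hj⟩ := Option.isSome_iff_exists.1 ((PySem.List.index?_isSome_iff t _).2 hmem)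
        rw [PySem.List.index?_cons_of_ne t he, hj]
        have : t.foldl min v < v := lt_of_le_of_ne hle (fun h => he h.symm)
        simp [this]
        ring
    · have hminv : min mn v = mn := by omega
      rw [if_neg hv, ih, hminv]
      by_cases hc : t.foldl min mn < mn
      · have hne : v ≠ t.foldl min mn := by omega
        have hmem : t.foldl min mn ∈ t := by
          rcases PySem.List.foldl_min_mem t mn with h | h
          · omega
          · exact h
        obtain ⟨j, hj⟩ := Option.isSome_iff_exists.1 ((PySem.List.index?_isSome_iff t _).2 hmem)
        rw [PySem.List.index?_cons_of_ne t hne, hj]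
        simp [hc]
        ring
      · simp [hc]

theorem pvScanMaxSpec (t : List Int) (k mx mi : Int) :
    pvScanMax t k (mx, mi) =
      (t.foldl max mx,
       if mx < t.foldl max mx then k + ((PySem.List.index? t (t.foldl max mx)).getD 0 : Int) else mi) := by
  induction t generalizing k mx mi with
  | nil => simp [pvScanMax]
  | cons v t ih =>
    simp only [pvScanMax, List.foldl_cons]
    by_cases hv : v > mx
    · have hmaxv : max mx v = v := by omega
      rw [if_pos hv, ih, hmaxv]
      have hle : v ≤ t.foldl max v := (PySem.List.le_foldl_max t v).1
      have hcond : mx < t.foldl max v := by omega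
      rw [if_pos hcond]
      by_cases he : v = t.foldl max v
      · rw [← he, PySem.List.index?_cons_self]
        simp
      · have hmem : t.foldl max v ∈ t := by
          rcases PySem.List.foldl_max_mem t v with h | h
          · exact absurd h.symm he
          · exact h
        obtain ⟨j, hj⟩ := Option.isSome_iff_exists.1 ((PySem.List.index?_isSome_iff t _).2 hmem)
        rw [PySem.List.index?_cons_of_ne t he, hj]
        have : v < t.foldl max v := lt_of_le_of_ne hle he
        simp [this]
        ring
    · have hmaxv : max mx v = mx := by omega
      rw [if_neg hv, ih, hmaxv]
      by_cases hc : mx < t.foldl max mx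
      · have hne : v ≠ t.foldl max mx := by omega
        have hmem : t.foldl max mx ∈ t := by
          rcases PySem.List.foldl_max_mem t mx with h | h
          · omega
          · exact h
        obtain ⟨j, hj⟩ := Option.isSome_iff_exists.1 ((PySem.List.index?_isSome_iff t _).2 hmem)
        rw [PySem.List.index?_cons_of_ne t hne, hj]
        simp [hc]
        ring
      · simp [hc]

theorem pvSortPair (a b : Nat) :
    PySem.List.sorted [a, b] (fun x => x) false = if a ≤ b then [a, b] else [b, a] := by
  split
  · exact PySem.List.sorted_id_eq_of_perm_of_pairwise _ _ (List.Perm.refl _) (by simp; omega)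
  · exact PySem.List.sorted_id_eq_of_perm_of_pairwise _ _ (List.Perm.swap _ _ _) (by simp; omega)

theorem pvNegFold (l : List Int) (c : Int) :
    l.foldl (fun acc i => if i < 0 then acc + i else acc) c = c + pvNegsum l := by
  induction l generalizing c with
  | nil => simp [pvNegsum]
  | cons v t ih =>
    simp only [List.foldl_cons, pvNegsum_cons]
    by_cases h : v < 0
    · simp [h, ih, pvNeg]; ring
    · simp [h, ih, pvNeg]

theorem pvAfinal (l : List Int) (m M : Int) (miA mxA : Nat)
    (h1 : PySem.List.min? l (fun x => x) = some m)
    (h2 : PySem.List.max? l (fun x => x) = some M)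
    (h3 : PySem.List.index? l m = some miA)
    (h4 : PySem.List.index? l M = some mxA) :
    sum_negative_between_min_max l
      = pvNegsum ((l.drop (min miA mxA + 1)).take
            (((max miA mxA : Nat) : Int) - (((min miA mxA : Nat) : Int) + 1)).toNat) := by
  simp only [sum_negative_between_min_max, h1, h2, h3, h4, pvSortPair]
  by_cases hc : miA ≤ mxA
  · have hmin : min miA mxA = miA := by omega
    have hmax : max miA mxA = mxA := by omega
    rw [if_pos hc, hmin, hmax]
    show List.foldl (fun negative_sum i => if i < 0 then negative_sum + i else negative_sum) 0
        (PySem.List.slice l (some ((miA : Int) + 1)) (some (mxA : Int))) = _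
    rw [PySem.List.slice_toNat l (show (0:Int) ≤ (miA : Int) + 1 by omega) (show (0:Int) ≤ (mxA : Int) by omega), pvNegFold]
    have ha : ((miA : Int) + 1).toNat = miA + 1 := by omega
    have hb : ((mxA : Int)).toNat - (miA + 1) = ((mxA : Int) - ((miA : Int) + 1)).toNat := by omega
    rw [ha, hb]
    simp
  · have hmin : min miA mxA = mxA := by omega
    have hmax : max miA mxA = miA := by omega
    rw [if_neg hc, hmin, hmax]
    show List.foldl (fun negative_sum i => if i < 0 then negative_sum + i else negative_sum) 0
        (PySem.List.slice l (some ((mxA : Int) + 1)) (some (miA : Int))) = _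
    rw [PySem.List.slice_toNat l (show (0:Int) ≤ (mxA : Int) + 1 by omega) (show (0:Int) ≤ (miA : Int) by omega), pvNegFold]
    have ha : ((mxA : Int) + 1).toNat = mxA + 1 := by omega
    have hb : ((miA : Int)).toNat - (mxA + 1) = ((miA : Int) - ((mxA : Int) + 1)).toNat := by omega
    rw [ha, hb]
    simp

theorem pvMain (a0 : Int) (t : List Int) :
    sum_negative_between_min_max (a0 :: t) = sum_negative_between_min_max_alt (a0 :: t) := by
  have hmle : t.foldl min a0 ≤ a0 := (PySem.List.foldl_min_le t a0).1
  have hMge : a0 ≤ t.foldl max a0 := (PySem.List.le_foldl_max t a0).1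
  have hminpack : ∃ miA : Nat, PySem.List.index? (a0 :: t) (t.foldl min a0) = some miA ∧
      pvScanMin t 1 (a0, 0) = (t.foldl min a0, (miA : Int)) := by
    rw [pvScanMinSpec]
    by_cases hm : t.foldl min a0 < a0
    · have hne : a0 ≠ t.foldl min a0 := by omega
      have hmem : t.foldl min a0 ∈ t := by
        rcases PySem.List.foldl_min_mem t a0 with h | h
        · omega
        · exact h
      obtain ⟨j, hj⟩ := Option.isSome_iff_exists.1 ((PySem.List.index?_isSome_iff t _).2 hmem)
      refine ⟨j + 1, ?_, ?_⟩
      · rw [PySem.List.index?_cons_of_ne t hne, hj]; rfl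
      · rw [hj]; simp [hm]; omega
    · have heq : t.foldl min a0 = a0 := by omega
      refine ⟨0, ?_, ?_⟩
      · rw [heq, PySem.List.index?_cons_self]
      · simp [hm]
  have hmaxpack : ∃ mxA : Nat, PySem.List.index? (a0 :: t) (t.foldl max a0) = some mxA ∧
      pvScanMax t 1 (a0, 0) = (t.foldl max a0, (mxA : Int)) := by
    rw [pvScanMaxSpec]
    by_cases hM : a0 < t.foldl max a0
    · have hne : a0 ≠ t.foldl max a0 := by omega
      have hmem : t.foldl max a0 ∈ t := by
        rcases PySem.List.foldl_max_mem t a0 with h | h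
        · omega
        · exact h
      obtain ⟨j, hj⟩ := Option.isSome_iff_exists.1 ((PySem.List.index?_isSome_iff t _).2 hmem)
      refine ⟨j + 1, ?_, ?_⟩
      · rw [PySem.List.index?_cons_of_ne t hne, hj]; rfl
      · rw [hj]; simp [hM]; omega
    · have heq : t.foldl max a0 = a0 := by omega
      refine ⟨0, ?_, ?_⟩
      · rw [heq, PySem.List.index?_cons_self]
      · simp [hM]
  obtain ⟨miA, hmiA, hscanmin⟩ := hminpack
  obtain ⟨mxA, hmxA, hscanmax⟩ := hmaxpack
  have hmiAlt : miA < (a0 :: t).length := pvIndexLt _ _ _ hmiA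
  have hmxAlt : mxA < (a0 :: t).length := pvIndexLt _ _ _ hmxA
  have hstate : (a0 :: t).foldl pvBStep ([0], ((a0, 0), (a0, 0)), 0)
      = (0 :: pvPrefixes 0 (a0 :: t),
         ((t.foldl min a0, (miA : Int)), (t.foldl max a0, (mxA : Int))), (1:Int) + t.length) := by
    rw [List.foldl_cons]
    have h0 : pvBStep ([0], ((a0, 0), (a0, 0)), 0) a0
        = ([0] ++ [0 + pvNeg a0], ((a0, 0), (a0, 0)), (1:Int)) := by
      simp [pvBStep, pvAltStep, pvNeg, PySem.List.pyGet?_neg_one]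
    rw [h0, pvBfold t [0] (0 + pvNeg a0) ((a0, 0), (a0, 0)) 1 (le_refl a0)]
    rw [hscanmin, hscanmax]
    simp [pvPrefixes]
  have hA := pvAfinal (a0 :: t) _ _ miA mxA (PySem.List.min?_id_cons a0 t)
    (PySem.List.max?_id_cons a0 t) hmiA hmxA
  rw [hA]
  simp only [sum_negative_between_min_max_alt, hstate]
  have hlo : (if (miA : Int) ≤ (mxA : Int) then (miA : Int) else (mxA : Int))
      = ((min miA mxA : Nat) : Int) := by split <;> push_cast <;> omega
  have hhi : (if (miA : Int) ≤ (mxA : Int) then (mxA : Int) else (miA : Int))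
      = ((max miA mxA : Nat) : Int) := by split <;> push_cast <;> omega
  rw [hlo, hhi]
  set lo := min miA mxA with hlodef
  set hi := max miA mxA with hhidef
  have hhilen : hi < (a0 :: t).length := by
    rw [hhidef]; omega
  by_cases hgt : (lo : Int) < (hi : Int)
  · rw [if_pos hgt]
    have hltn : lo < hi := by exact_mod_cast hgt
    rw [PySem.List.pyGet?_natCast,
        show ((lo : Int) + 1) = ((lo + 1 : Nat) : Int) by push_cast; ring,
        PySem.List.pyGet?_natCast,
        pvPget (a0 :: t) 0 hi (by omega),
        pvPget (a0 :: t) 0 (lo + 1) (by omega)]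
    simp only [Option.getD_some]
    have hsplit := pvNegsum_split (a0 :: t) (lo + 1) hi (by omega)
    have harg : (((hi : Nat) : Int) - (((lo + 1 : Nat)) : Int)).toNat = hi - (lo + 1) := by
      push_cast; omega
    rw [harg]
    linarith
  · rw [if_neg hgt]
    have heq : hi = lo := by
      have : lo ≤ hi := by rw [hlodef, hhidef]; omega
      omega
    have harg : (((hi : Nat) : Int) - (((lo : Nat) : Int) + 1)).toNat = 0 := by
      rw [heq]; omega
    rw [harg]
    simp [pvNegsum]

-- ===== VERDICT (by name: the statement is the Claim_ definition above) =====
theorem sum_negative_between_min_max_spec : Claim_equal_sum_negative_between_min_max := by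
  intro array _ hpre
  unfold Spec_sum_negative_between_min_max
  match array with
  | [] => exact absurd rfl hpre
  | a0 :: t => exact pvMain a0 t
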